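-- pv_equiv track=rewrite | github.com/lunalunaris/flutterBackend | FlaskMain.py | getProjectionHorizontalOrientation
-- ===== SOURCE A (Python) =====
-- BLACK = 0
--
-- def getProjectionHorizontalOrientation(array):
--     linecount = 0
--     countHorizontal = []
--     for j in range(0, len(array[0])):
--         countHorizontal.append(0)
--     for i in range(0, len(array)):
--         for j in range(0, len(array[0])):
--             if array[i][j] == BLACK:
--                 countHorizontal[j] = countHorizontal[j] + 1
--     for k in range(0, len(countHorizontal) - 1):
--         if countHorizontal[k] <= 2 and countHorizontal[k + 1] > 2:
--             linecount += 1
--     return linecount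
-- ===== SOURCE B (Python) =====
-- BLACK = 0
--
-- def getProjectionHorizontalOrientation(array):
--     # one column-major pass: keep only the previous column's black count
--     linecount = 0
--     prev = 0
--     for j in range(len(array[0])):
--         cur = 0
--         for row in array:
--             if row[j] == BLACK:
--                 cur += 1
--         if j > 0 and prev <= 2 and cur > 2:
--             linecount += 1
--         prev = cur
--     return linecount
-- ===== Notes on version B (the rewrite author's own statement) =====
-- stated objective: alternative
-- what changed: B fuses the three loops into one column-major pass that keeps only the previous column's black-pixel count in a scalar, never materialising the countHorizontal list.
import Mathlib
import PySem

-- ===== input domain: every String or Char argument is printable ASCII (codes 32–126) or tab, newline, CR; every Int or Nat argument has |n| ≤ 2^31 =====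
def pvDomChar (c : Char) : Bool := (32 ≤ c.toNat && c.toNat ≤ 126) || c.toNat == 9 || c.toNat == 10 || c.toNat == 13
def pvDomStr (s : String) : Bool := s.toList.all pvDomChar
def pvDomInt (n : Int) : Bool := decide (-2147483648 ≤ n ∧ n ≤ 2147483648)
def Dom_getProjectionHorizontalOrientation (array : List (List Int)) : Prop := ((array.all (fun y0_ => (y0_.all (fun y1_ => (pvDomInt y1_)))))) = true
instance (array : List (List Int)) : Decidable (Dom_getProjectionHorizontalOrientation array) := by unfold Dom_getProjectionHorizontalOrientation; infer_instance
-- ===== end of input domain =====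

-- One honest line: B fuses A's three loops into one column-major pass keeping only the
-- previous column's black count in a scalar (no countHorizontal list); same asymptotic cost.


-- ===== PORT A =====
def getProjectionHorizontalOrientation (array : List (List Int)) : Int :=
  -- linecount = 0; countHorizontal = [] then filled with len(array[0]) zeros
  let w : Int := ((PySem.List.pyGetD array 0 []).length : Int)
  let ch0 : List Int := (PySem.List.pyRange 0 w 1).foldl (fun acc _ => acc ++ [0]) []
  -- for i in range(len(array)): for j in range(len(array[0])): count blacks per column
  let ch : List Int :=
    (PySem.List.pyRange 0 (array.length : Int) 1).foldl (fun ch i =>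
      (PySem.List.pyRange 0 w 1).foldl (fun ch j =>
        if PySem.List.pyGetD (PySem.List.pyGetD array i []) j 1 = 0 then
          PySem.List.pySetD ch j (PySem.List.pyGetD ch j 0 + 1)
        else ch) ch) ch0
  -- for k in range(len(countHorizontal) - 1): count threshold transitions
  (PySem.List.pyRange 0 ((ch.length : Int) - 1) 1).foldl (fun lc k =>
    if PySem.List.pyGetD ch k 0 ≤ 2 ∧ PySem.List.pyGetD ch (k + 1) 0 > 2 then lc + 1 else lc) 0

-- ===== PORT B =====
def getProjectionHorizontalOrientation_alt (array : List (List Int)) : Int :=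
  let w : Int := ((PySem.List.pyGetD array 0 []).length : Int)
  ((PySem.List.pyRange 0 w 1).foldl (fun (st : Int × Int) j =>
      let cur : Int := array.foldl (fun c row => if PySem.List.pyGetD row j 1 = 0 then c + 1 else c) 0
      (if j > 0 ∧ st.2 ≤ 2 ∧ cur > 2 then st.1 + 1 else st.1, cur)) ((0 : Int), (0 : Int))).1

-- ===== PRECONDITION & SPEC =====
-- Pre_ excludes exactly the inputs where Python A raises IndexError: the empty outer list
-- (len(array[0])) and ragged arrays with a row shorter than the first row (array[i][j]).
def Pre_getProjectionHorizontalOrientation (array : List (List Int)) : Prop :=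
  array ≠ [] ∧ ∀ row ∈ array, (PySem.List.pyGetD array 0 []).length ≤ row.length
instance (array : List (List Int)) : Decidable (Pre_getProjectionHorizontalOrientation array) := by unfold Pre_getProjectionHorizontalOrientation; infer_instance

def pvWitness_getProjectionHorizontalOrientation : List (List Int) := [[0, 1, 0], [0, 0, 0], [1, 0, 0]]

def Spec_getProjectionHorizontalOrientation (array : List (List Int)) (out : Int) : Prop := out = getProjectionHorizontalOrientation_alt array
instance (array : List (List Int)) (out : Int) : Decidable (Spec_getProjectionHorizontalOrientation array out) := by unfold Spec_getProjectionHorizontalOrientation; infer_instance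

-- ===== CLAIM (what is proved, stated in full; the proofs are below) =====
def Claim_equal_getProjectionHorizontalOrientation : Prop := ∀ (array : List (List Int)), Dom_getProjectionHorizontalOrientation array → Pre_getProjectionHorizontalOrientation array → Spec_getProjectionHorizontalOrientation array (getProjectionHorizontalOrientation array)

-- ===== LEMMAS AND PROOFS =====

-- number of black pixels in column j (B's inner loop, with an arbitrary start value)
def pvCnt (array : List (List Int)) (j : Int) : Int :=
  array.foldl (fun c row => if PySem.List.pyGetD row j 1 = 0 then c + 1 else c) 0

lemma pvCnt_shift (array : List (List Int)) (j : Int) (c : Int) :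
    array.foldl (fun c row => if PySem.List.pyGetD row j 1 = 0 then c + 1 else c) c
      = c + pvCnt array j := by
  unfold pvCnt
  induction array generalizing c with
  | nil => simp
  | cons r t ih =>
    have h1 := ih (if PySem.List.pyGetD r j 1 = 0 then c + 1 else c)
    have h2 := ih (if PySem.List.pyGetD r j 1 = 0 then (0 : Int) + 1 else (0 : Int))
    simp only [List.foldl_cons]
    rw [h1, h2]
    split_ifs <;> ring

-- A's inner per-row pass, as a function of the (Nat) column bound
def pvF (row : List Int) (ch : List Int) (n : Nat) : List Int :=
  (PySem.List.pyRange 0 (n : Int) 1).foldl (fun ch j =>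
    if PySem.List.pyGetD row j 1 = 0 then
      PySem.List.pySetD ch j (PySem.List.pyGetD ch j 0 + 1)
    else ch) ch

lemma pvF_succ (row ch : List Int) (n : Nat) :
    pvF row ch (n + 1)
      = (if PySem.List.pyGetD row (n : Int) 1 = 0 then
          PySem.List.pySetD (pvF row ch n) (n : Int) (PySem.List.pyGetD (pvF row ch n) (n : Int) 0 + 1)
        else pvF row ch n) := by
  unfold pvF
  rw [show ((n + 1 : Nat) : Int) = (n : Int) + 1 by push_cast; ring,
      PySem.List.pyRange_one_succ_right (Int.natCast_nonneg n), List.foldl_append]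
  simp

lemma pvF_length (row ch : List Int) (n : Nat) : (pvF row ch n).length = ch.length := by
  induction n with
  | zero => unfold pvF; simp
  | succ k ih => rw [pvF_succ]; split_ifs <;> simp [ih]

lemma pvF_get (row ch : List Int) (n : Nat) (hn : n ≤ ch.length) (j : Nat) (hj : j < ch.length) :
    PySem.List.pyGetD (pvF row ch n) (j : Int) 0
      = PySem.List.pyGetD ch (j : Int) 0
        + (if j < n ∧ PySem.List.pyGetD row (j : Int) 1 = 0 then 1 else 0) := by
  induction n with
  | zero => unfold pvF; simp
  | succ k ih =>
    have ihk := ih (Nat.le_of_succ_le hn)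
    rw [pvF_succ]
    by_cases hjk : j = k
    · subst hjk
      by_cases hb : PySem.List.pyGetD row (j : Int) 1 = 0
      · have hjlen : j < (pvF row ch j).length := by rw [pvF_length]; omega
        rw [if_pos hb, PySem.List.pyGetD_pySetD_natCast _ _ _ _ _ hjlen, if_pos rfl, ihk,
            if_neg (by omega : ¬ (j < j ∧ PySem.List.pyGetD row (j : Int) 1 = 0)),
            if_pos ⟨Nat.lt_succ_self j, hb⟩]
        ring
      · rw [if_neg hb, ihk,
            if_neg (by omega : ¬ (j < j ∧ PySem.List.pyGetD row (j : Int) 1 = 0)),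
            if_neg (fun h => hb h.2)]
    · have hiff : (j < k ∧ PySem.List.pyGetD row (j : Int) 1 = 0)
                ↔ (j < k + 1 ∧ PySem.List.pyGetD row (j : Int) 1 = 0) := by
        constructor <;> rintro ⟨h1, h2⟩ <;> exact ⟨by omega, h2⟩
      by_cases hb : PySem.List.pyGetD row (k : Int) 1 = 0
      · have hklen : k < (pvF row ch k).length := by rw [pvF_length]; omega
        rw [if_pos hb, PySem.List.pyGetD_pySetD_natCast _ _ _ _ _ hklen,
            if_neg hjk, ihk,
            if_congr hiff rfl rfl]
      · rw [if_neg hb, ihk, if_congr hiff rfl rfl]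


-- the chained row passes: length is preserved and entry j accumulates the column count
lemma pvChain_length (rows : List (List Int)) (ch : List Int) (w : Nat) :
    (rows.foldl (fun ch row => pvF row ch w) ch).length = ch.length := by
  induction rows generalizing ch with
  | nil => rfl
  | cons r t ih => simp only [List.foldl_cons]; rw [ih, pvF_length]

lemma pvCnt_cons (r : List Int) (t : List (List Int)) (j : Int) :
    pvCnt (r :: t) j = (if PySem.List.pyGetD r j 1 = 0 then 1 else 0) + pvCnt t j := by
  unfold pvCnt
  simp only [List.foldl_cons]
  rw [pvCnt_shift t j (if PySem.List.pyGetD r j 1 = 0 then (0 : Int) + 1 else (0 : Int)),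
      pvCnt_shift t j 0]
  split_ifs <;> ring

lemma pvChain_get (rows : List (List Int)) (ch : List Int) (w : Nat) (hw : ch.length = w)
    (j : Nat) (hj : j < w) :
    PySem.List.pyGetD (rows.foldl (fun ch row => pvF row ch w) ch) (j : Int) 0
      = PySem.List.pyGetD ch (j : Int) 0 + pvCnt rows (j : Int) := by
  induction rows generalizing ch with
  | nil => simp [pvCnt]
  | cons r t ih =>
    simp only [List.foldl_cons]
    rw [ih (pvF r ch w) (by rw [pvF_length, hw]),
        pvF_get r ch w (le_of_eq hw.symm) j (by omega), pvCnt_cons]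
    have hjw : j < w := hj
    split_ifs with h1 h2 h2
    · ring
    · exact absurd h1.2 h2
    · exact absurd ⟨hjw, h2⟩ h1
    · ring

-- B's fused loop, characterised: first component = A's transition fold, second = last column count
lemma pvB_loop (cnt : Int → Int) (w : Nat) :
    ((PySem.List.pyRange 0 (w : Int) 1).foldl (fun (st : Int × Int) j =>
        (if j > 0 ∧ st.2 ≤ 2 ∧ cnt j > 2 then st.1 + 1 else st.1, cnt j)) ((0 : Int), (0 : Int)))
      = ((PySem.List.pyRange 0 ((w : Int) - 1) 1).foldl (fun lc k =>
            if cnt k ≤ 2 ∧ cnt (k + 1) > 2 then lc + 1 else lc) 0,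
         if w = 0 then 0 else cnt ((w : Int) - 1)) := by
  induction w with
  | zero => simp [PySem.List.pyRange_one_eq_nil]
  | succ k ih =>
    rw [show ((k + 1 : Nat) : Int) = (k : Int) + 1 by push_cast; ring,
        PySem.List.pyRange_one_succ_right (Int.natCast_nonneg k), List.foldl_append, ih]
    simp only [List.foldl_cons, List.foldl_nil]
    by_cases hk : k = 0
    · subst hk
      norm_num [PySem.List.pyRange_one_eq_nil]
    · have hk1 : (1 : Int) ≤ (k : Int) := by exact_mod_cast Nat.one_le_iff_ne_zero.mpr hk
      have hsplit : PySem.List.pyRange 0 ((k : Int) + 1 - 1) 1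
          = PySem.List.pyRange 0 ((k : Int) - 1) 1 ++ [(k : Int) - 1] := by
        rw [show (k : Int) + 1 - 1 = ((k : Int) - 1) + 1 by ring]
        exact PySem.List.pyRange_one_succ_right (by omega)
      rw [hsplit, List.foldl_append]
      simp only [List.foldl_cons, List.foldl_nil, if_neg hk, Prod.mk.injEq]
      refine ⟨?_, ?_⟩
      · rw [show (k : Int) - 1 + 1 = (k : Int) by ring]
        have : ((k : Int) > 0 ∧ cnt ((k : Int) - 1) ≤ 2 ∧ cnt (k : Int) > 2)
             ↔ (cnt ((k : Int) - 1) ≤ 2 ∧ cnt ((k : Int)) > 2) := by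
          constructor
          · rintro ⟨_, h⟩; exact h
          · intro h; exact ⟨by omega, h⟩
        rw [if_congr this rfl rfl]
      · norm_num

-- ===== VERDICT (by name: the statement is the Claim_ definition above) =====
theorem getProjectionHorizontalOrientation_spec : Claim_equal_getProjectionHorizontalOrientation := by
  intro array _ _
  unfold Spec_getProjectionHorizontalOrientation
  unfold getProjectionHorizontalOrientation getProjectionHorizontalOrientation_alt
  simp only []
  set wN : Nat := (PySem.List.pyGetD array 0 []).length with hwN
  -- A's outer index loop is a fold of the per-row pass pvF over the rows themselves
  have houter := PySem.List.foldl_pyRange_zero_pyGetD' array ([] : List Int)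
      (fun ch row => pvF row ch wN)
      ((PySem.List.pyRange 0 (wN : Int) 1).foldl (fun acc _ => acc ++ [(0 : Int)]) [])
  simp only [pvF] at houter
  rw [houter]
  have hfoldpv : List.foldl (fun (ch : List Int) (row : List Int) =>
        List.foldl (fun ch j => if PySem.List.pyGetD row j 1 = 0 then
            PySem.List.pySetD ch j (PySem.List.pyGetD ch j 0 + 1) else ch)
          ch (PySem.List.pyRange 0 (wN : Int) 1))
        ((PySem.List.pyRange 0 (wN : Int) 1).foldl (fun acc _ => acc ++ [(0 : Int)]) []) array
      = array.foldl (fun ch row => pvF row ch wN)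
        ((PySem.List.pyRange 0 (wN : Int) 1).foldl (fun acc _ => acc ++ [(0 : Int)]) []) := rfl
  rw [hfoldpv]
  have hch0 : ((PySem.List.pyRange 0 (wN : Int) 1).foldl (fun acc _ => acc ++ [(0 : Int)]) [])
      = (PySem.List.pyRange 0 (wN : Int) 1).map (fun _ => (0 : Int)) := by
    rw [PySem.List.foldl_append_singleton_eq_map (fun _ => (0 : Int))]
    simp
  have hch0len : ((PySem.List.pyRange 0 (wN : Int) 1).foldl (fun acc _ => acc ++ [(0 : Int)]) []).length = wN := by
    rw [hch0, List.length_map, PySem.List.length_pyRange_one]; omega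
  set ch : List Int := array.foldl (fun ch row => pvF row ch wN)
      ((PySem.List.pyRange 0 (wN : Int) 1).foldl (fun acc _ => acc ++ [(0 : Int)]) []) with hchdef
  have hchlen : ch.length = wN := by rw [hchdef, pvChain_length]; exact hch0len
  -- each in-range entry of ch is the column count
  have hget : ∀ k : Int, 0 ≤ k → k < (wN : Int) → PySem.List.pyGetD ch k 0 = pvCnt array k := by
    intro k hk0 hkw
    have hk : k = ((k.toNat : Nat) : Int) := by omega
    rw [hk, hchdef, pvChain_get array _ wN hch0len k.toNat (by omega), hch0,
        PySem.List.pyGetD_map_pyRange_of_nonneg _ _ _ _ (by omega) (by omega)]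
    ring
  -- rewrite A's transition fold through hget and close with pvB_loop
  rw [hchlen]
  have hB := pvB_loop (pvCnt array) wN
  simp only [pvCnt] at hB
  refine Eq.trans ?_ (congrArg Prod.fst hB).symm
  simp only [pvCnt] at hget
  apply PySem.List.foldl_congr_mem
  intro acc k hkmem
  have hk := PySem.List.mem_pyRange_one.mp hkmem
  rw [hget k hk.1 (by omega), hget (k + 1) (by omega) (by omega)]
  rfl
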